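-- pv_equiv track=rewrite | github.com/alexandraback/datacollection | solutions_5631989306621952_1/Python/Cyanfish/a.py | result
-- ===== SOURCE A (Python) =====
-- def result(s):
--     if len(s) == 0:
--         return ""
--     largest = None
--     largestOrd = 0
--     largestIndex = -1
--     for i in range(len(s)):
--         c = s[i]
--         if ord(c) >= largestOrd:
--             largest = c
--             largestOrd = ord(c)
--             largestIndex = i
--     return largest + result(s[:largestIndex]) + s[largestIndex+1:]
-- ===== SOURCE B (Python) =====
-- def result(s):
--     # One pass: collect the "record" positions (char >= all before it); the
--     # recursion in A visits exactly these, so join chars (back to front) and gap slices.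
--     rec = []
--     best = -1
--     for i, c in enumerate(s):
--         o = ord(c)
--         if o >= best:
--             best = o
--             rec.append((i, c))
--     parts = [c for _, c in reversed(rec)]
--     for t in range(len(rec)):
--         start = rec[t][0] + 1
--         end = rec[t + 1][0] if t + 1 < len(rec) else len(s)
--         parts.append(s[start:end])
--     return "".join(parts)
-- ===== Notes on version B (the rewrite author's own statement) =====
-- stated objective: faster
-- what changed: Replaces A's recursion (rescan the whole prefix for its rightmost maximum at every level) by a single left-to-right pass that collects all record positions (char >= every earlier char), then joins the record chars back-to-front with the gap slices between consecutive records.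
import Mathlib
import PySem

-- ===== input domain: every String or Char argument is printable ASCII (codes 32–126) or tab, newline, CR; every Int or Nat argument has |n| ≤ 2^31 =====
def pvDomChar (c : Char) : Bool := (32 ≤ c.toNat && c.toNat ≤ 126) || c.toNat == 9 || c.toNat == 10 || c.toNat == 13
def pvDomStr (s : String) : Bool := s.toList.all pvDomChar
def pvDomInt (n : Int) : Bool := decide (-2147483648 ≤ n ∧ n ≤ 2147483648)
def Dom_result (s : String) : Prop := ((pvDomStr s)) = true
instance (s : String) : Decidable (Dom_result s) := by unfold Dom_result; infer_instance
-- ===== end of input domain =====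

-- B replaces A's quadratic recursion by one left-to-right pass collecting the
-- "record" positions (char >= every earlier char) and joining chars and gap slices.

-- ===== PORT A =====
-- loop body of A: state = (largest, largestOrd, largestIndex), c = (i, s[i]); ord c = Char.toNat (exact: codepoint)
def resultAStep (st : Option Char × Int × Int) (ic : Int × Char) : Option Char × Int × Int :=
  if (ic.2.toNat : Int) ≥ st.2.1 then (some ic.2, (ic.2.toNat : Int), ic.1) else st

-- the final largestIndex is an enumerate index, < len(s) (needed only for termination)
theorem foldA_idx_lt (l : List Char) : ∀ (s : Int) (st : Option Char × Int × Int), st.2.2 < s →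
    ((PySem.List.enumerate l s).foldl resultAStep st).2.2 < s + (l.length : Int) := by
  induction l with
  | nil => intro s st h; simpa [PySem.List.enumerate_nil] using h
  | cons x xs ih =>
    intro s st h
    rw [PySem.List.enumerate_cons, List.foldl_cons]
    have h' : (resultAStep st (s, x)).2.2 < s + 1 := by
      unfold resultAStep; split <;> simp <;> omega
    have := ih (s + 1) _ h'
    simp only [List.length_cons]
    push_cast at this ⊢
    omega

def resultA (l : List Char) : List Char :=
  if h : l = [] then [] else
    match hst : (PySem.List.enumerate l 0).foldl resultAStep (none, 0, -1) with
    -- 'none' is unreachable for nonempty l (Python would raise there); guard for totality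
    | (none, _, _) => []
    | (some c, _, li) =>
      -- s[:li] and s[li+1:] with 0 ≤ li < len(s): exact as take/drop
      c :: resultA (l.take li.toNat) ++ l.drop (li.toNat + 1)
termination_by l.length
decreasing_by
  have hb := foldA_idx_lt l 0 (none, 0, -1) (by norm_num)
  rw [hst] at hb
  simp only at hb
  have hl : l.length ≠ 0 := fun hh => h (List.eq_nil_of_length_eq_zero hh)
  simp only [List.length_take]
  omega

def result (s : String) : String := String.mk (resultA s.toList)

-- ===== PORT B =====
-- loop body of B: state = (best, rec); appends every record (i, c) with ord(c) >= best
def recsStep (st : Int × List (Int × Char)) (ic : Int × Char) : Int × List (Int × Char) :=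
  if (ic.2.toNat : Int) ≥ st.1 then ((ic.2.toNat : Int), st.2 ++ [ic]) else st

def recsOf (l : List Char) : Int × List (Int × Char) :=
  (PySem.List.enumerate l 0).foldl recsStep (-1, [])

-- the gap slices s[rec[t][0]+1 : end] (end = next record index, or len(s) for the last);
-- indices are ≥ 0, so the Python slice is exactly drop/take
def gaps (l : List Char) : List (Int × Char) → List Char
  | [] => []
  | [(i, _)] => l.drop (i.toNat + 1)
  | (i, _) :: (j, c) :: rest =>
      ((l.drop (i.toNat + 1)).take (j.toNat - (i.toNat + 1))) ++ gaps l ((j, c) :: rest)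

def result_alt (s : String) : String :=
  let l := s.toList
  let r := (recsOf l).2
  String.mk ((r.reverse.map Prod.snd) ++ gaps l r)

-- ===== PRECONDITION & SPEC =====
def Spec_result (s : String) (out : String) : Prop := out = result_alt s
instance (s : String) (out : String) : Decidable (Spec_result s out) := by unfold Spec_result; infer_instance

-- ===== CLAIM (what is proved, stated in full; the proofs are below) =====
def Claim_equal_result : Prop := ∀ (s : String), Dom_result s → Spec_result s (result s)

-- ===== LEMMAS AND PROOFS =====

-- joint invariant of the two folds over a common position bound s
def InvAB (s : Int) (stB : Int × List (Int × Char)) (stA : Option Char × Int × Int) : Prop :=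
  0 ≤ s ∧
  (∀ p ∈ stB.2, 0 ≤ p.1 ∧ p.1 < s) ∧
  List.Pairwise (fun p q => p.1 < q.1) stB.2 ∧
  (match stB.2.getLast? with
   | none => stB.1 = -1 ∧ stA = (none, 0, -1)
   | some p => stB.1 = (p.2.toNat : Int) ∧ stA = (some p.2, (p.2.toNat : Int), p.1))

theorem invAB_step (s : Int) (x : Char) (stB stA) (h : InvAB s stB stA) :
    InvAB (s + 1) (recsStep stB (s, x)) (resultAStep stA (s, x)) := by
  obtain ⟨hs, hb, hp, hlast⟩ := h
  cases hL : stB.2.getLast? with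
  | none =>
    have hnil : stB.2 = [] := List.getLast?_eq_none_iff.mp hL
    rw [hL] at hlast
    obtain ⟨hb1, ha1⟩ := hlast
    have hcB : (x.toNat : Int) ≥ stB.1 := by rw [hb1]; omega
    have hcA : (x.toNat : Int) ≥ (0 : Int) := by omega
    refine ⟨by omega, ?_, ?_, ?_⟩ <;>
      simp [recsStep, resultAStep, hcB, ha1, hcA, hnil] <;> omega
  | some p =>
    rw [hL] at hlast
    obtain ⟨hb1, ha1⟩ := hlast
    by_cases hc : (x.toNat : Int) ≥ (p.2.toNat : Int)
    · have hcB : (x.toNat : Int) ≥ stB.1 := by rw [hb1]; exact hc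
      refine ⟨by omega, ?_, ?_, ?_⟩
      · intro q hq
        simp [recsStep, hcB] at hq
        rcases hq with hq | hq
        · have := hb q hq; omega
        · subst hq; exact ⟨hs, by omega⟩
      · simp only [recsStep, if_pos hcB]
        rw [List.pairwise_append]
        exact ⟨hp, by simp, fun a ha b hb' => by simp at hb'; subst hb'; exact (hb a ha).2⟩
      · simp [recsStep, resultAStep, hcB, ha1, hc]
    · have hcB : ¬ (x.toNat : Int) ≥ stB.1 := by rw [hb1]; exact hc
      refine ⟨by omega, ?_, ?_, ?_⟩
      · intro q hq
        simp only [recsStep, if_neg hcB] at hq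
        have := hb q hq; omega
      · simpa [recsStep, if_neg hcB] using hp
      · simp [recsStep, resultAStep, ha1, hc, hL, hb1]

theorem invAB_fold (l : List Char) : ∀ (s : Int) stB stA, InvAB s stB stA →
    InvAB (s + l.length) ((PySem.List.enumerate l s).foldl recsStep stB)
      ((PySem.List.enumerate l s).foldl resultAStep stA) := by
  induction l with
  | nil => intro s stB stA h; simpa [PySem.List.enumerate_nil] using h
  | cons x xs ih =>
    intro s stB stA h
    rw [PySem.List.enumerate_cons]
    simp only [List.foldl_cons, List.length_cons]
    push_cast
    rw [show s + ((xs.length : Int) + 1) = s + 1 + (xs.length : Int) from by ring]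
    exact ih (s + 1) _ _ (invAB_step s x stB stA h)

theorem invAB_result (l : List Char) :
    InvAB l.length (recsOf l) ((PySem.List.enumerate l 0).foldl resultAStep (none, 0, -1)) := by
  have := invAB_fold l 0 (-1, []) (none, 0, -1)
    ⟨le_refl 0, by simp, by simp, by simp⟩
  simpa [recsOf] using this

-- the record list is nonempty for nonempty input
theorem recs_ne_nil_aux (l : List Char) : ∀ (s : Int) st,
    (st.2 ≠ [] ∨ (st.1 = -1 ∧ l ≠ [])) →
    ((PySem.List.enumerate l s).foldl recsStep st).2 ≠ [] := by
  induction l with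
  | nil =>
    intro s st h
    rcases h with h | ⟨_, h⟩
    · simpa [PySem.List.enumerate_nil] using h
    · exact absurd rfl h
  | cons x xs ih =>
    intro s st h
    rw [PySem.List.enumerate_cons, List.foldl_cons]
    apply ih
    left
    unfold recsStep
    split
    · simp
    · rename_i hcond
      rcases h with h | ⟨h1, h2⟩
      · exact h
      · exfalso; rw [h1] at hcond; exact hcond (by omega)

theorem recs_ne_nil (l : List Char) (h : l ≠ []) : (recsOf l).2 ≠ [] :=
  recs_ne_nil_aux l 0 (-1, []) (Or.inr ⟨rfl, h⟩)

-- fold-append law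
theorem recsOf_append (l : List Char) (x : Char) :
    recsOf (l ++ [x]) = recsStep (recsOf l) ((l.length : Int), x) := by
  unfold recsOf
  rw [PySem.List.enumerate_append, List.foldl_append]
  simp [PySem.List.enumerate_cons, PySem.List.enumerate_nil]

-- takeWhile helpers
theorem takeWhile_append_single {α : Type} (p : α → Bool) (A : List α) (b : α) (hb : p b = false) :
    List.takeWhile p (A ++ [b]) = List.takeWhile p A := by
  induction A with
  | nil => simp [List.takeWhile, hb]
  | cons a as ih =>
    simp only [List.cons_append, List.takeWhile]
    cases p a <;> simp [ih]

theorem takeWhile_of_all {α : Type} (p : α → Bool) (A : List α) (h : ∀ x ∈ A, p x = true) :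
    List.takeWhile p A = A := by
  induction A with
  | nil => rfl
  | cons a as ih =>
    simp only [List.takeWhile, h a (by simp)]
    simpa using ih (fun x hx => h x (by simp [hx]))

-- records of a prefix are the records with index below the cut
theorem recs_take (l : List Char) : ∀ (kn : Nat), kn ≤ l.length →
    (recsOf (l.take kn)).2 = (recsOf l).2.takeWhile (fun p => decide (p.1 < (kn : Int))) := by
  induction l using List.reverseRecOn with
  | nil => intro kn h; simp [recsOf, PySem.List.enumerate_nil]
  | append_singleton l x ih =>
    intro kn h
    rcases Nat.lt_or_ge kn (l.length + 1) with hlt | hge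
    · have hkn : kn ≤ l.length := by omega
      have ht : (l ++ [x]).take kn = l.take kn := by
        rw [List.take_append]
        simp [Nat.sub_eq_zero_of_le hkn]
      rw [ht, ih kn hkn, recsOf_append]
      unfold recsStep
      have hfail : (fun p => decide (p.1 < (kn : Int))) (((l.length : Int), x)) = false := by
        simp only [decide_eq_false_iff_not, not_lt]
        exact_mod_cast hkn
      split
      · simp only
        rw [takeWhile_append_single (fun p => decide (p.1 < (kn : Int))) (recsOf l).2 (((l.length : Int), x)) hfail]
      · rfl
    · have hkn : kn = l.length + 1 := by
        simp only [List.length_append, List.length_cons, List.length_nil] at h; omega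
      subst hkn
      rw [List.take_of_length_le (by simp)]
      rw [takeWhile_of_all]
      intro p hp
      have := (invAB_result (l ++ [x])).2.1 p hp
      simp only [List.length_append, List.length_cons, List.length_nil] at this
      simp only [decide_eq_true_eq]
      push_cast at this ⊢
      omega

-- gap decomposition at the last record
theorem gaps_append (l : List Char) (k : Int) (c : Char) : ∀ (r' : List (Int × Char)),
    (∀ p ∈ r', 0 ≤ p.1 ∧ p.1 < k) → 0 ≤ k → k.toNat ≤ l.length →
    gaps l (r' ++ [(k, c)]) = gaps (l.take k.toNat) r' ++ l.drop (k.toNat + 1) := by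
  intro r'
  induction r' with
  | nil => intro _ _ _; simp [gaps]
  | cons hd tl ih =>
    intro hmem hk hkl
    obtain ⟨i, ci⟩ := hd
    have hi := hmem (i, ci) (by simp)
    cases tl with
    | nil =>
      simp only [List.cons_append, List.nil_append, gaps]
      rw [List.drop_take]
    | cons hd2 tl2 =>
      obtain ⟨j, cj⟩ := hd2
      have hj := hmem (j, cj) (by simp)
      simp only [List.cons_append, gaps]
      rw [← List.cons_append, ih (fun p hp => hmem p (by simp [hp])) hk hkl, List.append_assoc]
      congr 1
      rw [List.drop_take, List.take_take]
      congr 1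
      omega

-- B's result as a function of the record list
def altB (l : List Char) : List Char :=
  ((recsOf l).2.reverse.map Prod.snd) ++ gaps l (recsOf l).2

theorem mainAB : ∀ (n : Nat) (l : List Char), l.length ≤ n → resultA l = altB l := by
  intro n
  induction n with
  | zero =>
    intro l hl
    have : l = [] := List.eq_nil_of_length_eq_zero (by omega)
    subst this
    rw [resultA]
    simp [altB, recsOf, PySem.List.enumerate_nil, gaps]
  | succ n ih =>
    intro l hl
    by_cases hne : l = []
    · subst hne
      rw [resultA]
      simp [altB, recsOf, PySem.List.enumerate_nil, gaps]
    · have hrs : (recsOf l).2 ≠ [] := recs_ne_nil l hne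
      obtain ⟨hs0, hbnd, hpw, hlast⟩ := invAB_result l
      have hget : (recsOf l).2.getLast? = some ((recsOf l).2.getLast hrs) :=
        List.getLast?_eq_getLast hrs
      rw [hget] at hlast
      obtain ⟨hbest, hA⟩ := hlast
      set p := (recsOf l).2.getLast hrs with hpdef
      set r' := (recsOf l).2.dropLast with hr'def
      have hsplit : r' ++ [p] = (recsOf l).2 := List.dropLast_append_getLast hrs
      have hpbnd : 0 ≤ p.1 ∧ p.1 < l.length := hbnd p (List.getLast_mem hrs)
      have hr'lt : ∀ q ∈ r', q.1 < p.1 := by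
        intro q hq
        rw [← hsplit] at hpw
        exact (List.pairwise_append.mp hpw).2.2 q hq p (by simp)
      have hr'bnd : ∀ q ∈ r', 0 ≤ q.1 ∧ q.1 < p.1 := by
        intro q hq
        refine ⟨(hbnd q ?_).1, hr'lt q hq⟩
        rw [← hsplit]; exact List.mem_append_left _ hq
      have hktoNat : ((p.1.toNat : Int)) = p.1 := Int.toNat_of_nonneg hpbnd.1
      have htake_len : p.1.toNat ≤ l.length := by omega
      -- records of the prefix l.take p.1.toNat are exactly r'
      have hrecs_take : (recsOf (l.take p.1.toNat)).2 = r' := by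
        rw [recs_take l p.1.toNat htake_len, ← hsplit]
        rw [takeWhile_append_single _ _ _ (by simp [hktoNat])]
        exact takeWhile_of_all _ _ (fun q hq => by
          simp only [decide_eq_true_eq, hktoNat]
          exact hr'lt q hq)
      -- unfold A at l
      rw [resultA, dif_neg hne]
      split
      · rename_i heq
        rw [hA] at heq
        simp at heq
      · rename_i c o li heq
        rw [hA] at heq
        have h2 : (some c, o, li) = (some p.2, (p.2.toNat : Int), p.1) := heq.symm
        simp only [Prod.mk.injEq, Option.some.injEq] at h2
        obtain ⟨hc1, hc2, hc3⟩ := h2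
        subst hc1; subst hc3
        have hIH : resultA (l.take p.1.toNat) = altB (l.take p.1.toNat) := by
          apply ih
          rw [List.length_take]
          omega
        rw [hIH]
        unfold altB
        rw [hrecs_take, ← hsplit]
        have hgaps : gaps l (r' ++ [p]) = gaps (l.take p.1.toNat) r' ++ l.drop (p.1.toNat + 1) := by
          have := gaps_append l p.1 p.2 r' hr'bnd hpbnd.1 htake_len
          simpa using this
        rw [hgaps]
        simp [List.append_assoc]

-- ===== VERDICT (by name: the statement is the Claim_ definition above) =====
theorem result_spec : Claim_equal_result := by
  intro s _
  unfold Spec_result result result_alt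
  simp only
  exact congrArg String.mk (mainAB s.toList.length s.toList le_rfl)
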